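-- pv_equiv track=rewrite | github.com/waldooCreator/Cargue_Masivo | estructuras/clasificador.py | _extraer_altura_de_uc
-- ===== SOURCE A (Python) =====
-- def _extraer_altura_de_uc(uc: str) -> float:
--     """
--     Extrae la altura típica de la UC según el tipo
--     N1L -> 8m, N2L -> 10m, N3L -> 12m, N4L -> 14m
--     """
--     if not uc:
--         return 0
--
--     alturas_uc = {
--         'N1L': 8,
--         'N2L': 10,
--         'N3L': 12,
--         'N4L': 14
--     }
--
--     for prefix, altura in alturas_uc.items():
--         if uc.startswith(prefix):
--             return altura
--     return 0
-- ===== SOURCE B (Python) =====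
-- def _extraer_altura_de_uc(uc: str) -> float:
--     """Parse the UC code arithmetically: 'N<d>L...' with d in 1..4 maps to 6 + 2*d."""
--     if len(uc) >= 3 and uc[0] == 'N' and uc[2] == 'L' and uc[1] in '1234':
--         return 6 + 2 * int(uc[1])
--     return 0
-- ===== Notes on version B (the rewrite author's own statement) =====
-- stated objective: simpler
-- what changed: Replaces the four-entry prefix dict scanned with startswith by a direct parse of the three leading characters and the closed-form height 6 + 2*digit.
import Mathlib
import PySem

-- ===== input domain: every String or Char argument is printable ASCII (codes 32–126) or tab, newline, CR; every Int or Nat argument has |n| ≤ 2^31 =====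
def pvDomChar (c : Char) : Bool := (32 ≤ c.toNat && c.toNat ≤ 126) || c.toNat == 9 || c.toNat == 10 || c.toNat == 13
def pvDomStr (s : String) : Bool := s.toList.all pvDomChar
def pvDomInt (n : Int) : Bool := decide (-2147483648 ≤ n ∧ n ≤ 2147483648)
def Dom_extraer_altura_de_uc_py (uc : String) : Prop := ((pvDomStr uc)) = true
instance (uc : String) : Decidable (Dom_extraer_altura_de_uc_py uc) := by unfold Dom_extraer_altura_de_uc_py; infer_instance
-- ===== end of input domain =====

-- B replaces A's startswith scan over a four-entry prefix table by parsing the three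
-- leading characters and computing the height as 6 + 2*digit (simpler, closed form).

-- ===== PORT A =====
-- the 'for prefix, altura in alturas_uc.items(): if uc.startswith(prefix): return altura' loop
def aLoop : List (List Char × Int) → List Char → Int
  | [], _ => 0
  | (p, h) :: rest, s => if PySem.Chars.startswith s p then h else aLoop rest s

def extraer_altura_de_uc_py (uc : String) : Int :=
  if uc.toList = [] then 0
  else aLoop [("N1L".toList, 8), ("N2L".toList, 10), ("N3L".toList, 12), ("N4L".toList, 14)] uc.toList

-- ===== PORT B =====
-- len(uc) >= 3 is the three-char pattern match; int(uc[1]) is the digit value c1.toNat - 48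
def extraer_altura_de_uc_py_alt (uc : String) : Int :=
  match uc.toList with
  | c0 :: c1 :: c2 :: _ =>
    if c0 = 'N' ∧ c2 = 'L' ∧ (c1 = '1' ∨ c1 = '2' ∨ c1 = '3' ∨ c1 = '4')
    then 6 + 2 * ((c1.toNat : Int) - 48)
    else 0
  | _ => 0

-- ===== PRECONDITION & SPEC =====
def Spec_extraer_altura_de_uc_py (uc : String) (out : Int) : Prop := out = extraer_altura_de_uc_py_alt uc
instance (uc : String) (out : Int) : Decidable (Spec_extraer_altura_de_uc_py uc out) := by unfold Spec_extraer_altura_de_uc_py; infer_instance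

-- ===== CLAIM (what is proved, stated in full; the proofs are below) =====
def Claim_equal_extraer_altura_de_uc_py : Prop := ∀ (uc : String), Dom_extraer_altura_de_uc_py uc → Spec_extraer_altura_de_uc_py uc (extraer_altura_de_uc_py uc)

-- ===== LEMMAS AND PROOFS =====

-- ===== VERDICT (by name: the statement is the Claim_ definition above) =====
theorem sw3 (a b c c0 c1 c2 : Char) (rest : List Char) :
    PySem.Chars.startswith (c0 :: c1 :: c2 :: rest) [a, b, c] = true ↔ (c0 = a ∧ c1 = b ∧ c2 = c) := by
  rw [PySem.Chars.startswith_iff]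
  constructor
  · rintro ⟨t, h⟩
    simp only [List.cons_append, List.nil_append, List.cons.injEq] at h
    exact ⟨h.1.symm, h.2.1.symm, h.2.2.1.symm⟩
  · rintro ⟨rfl, rfl, rfl⟩; exact ⟨rest, rfl⟩

-- ===== VERDICT (by name: the statement is the Claim_ definition above) =====
theorem extraer_altura_de_uc_py_spec : Claim_equal_extraer_altura_de_uc_py := by
  intro uc _
  unfold Spec_extraer_altura_de_uc_py extraer_altura_de_uc_py extraer_altura_de_uc_py_alt
  match h : uc.toList with
  | [] => simp
  | [c0] => simp [aLoop, PySem.Chars.startswith_iff, List.IsPrefix]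
  | [c0, c1] => simp [aLoop, PySem.Chars.startswith_iff, List.IsPrefix]
  | c0 :: c1 :: c2 :: rest =>
    simp only [aLoop, List.cons_ne_nil, reduceIte, show ("N1L".toList) = ['N','1','L'] from rfl,
      show ("N2L".toList) = ['N','2','L'] from rfl, show ("N3L".toList) = ['N','3','L'] from rfl,
      show ("N4L".toList) = ['N','4','L'] from rfl, sw3]
    split_ifs <;> first
      | rfl
      | tauto
      | (obtain ⟨-, rfl, -⟩ := ‹_ = 'N' ∧ _ ∧ _ = 'L'›; decide)
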